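-- pv_equiv track=rewrite | github.com/jisuncho/Programmers-code | 60058.py | alright
-- ===== SOURCE A (Python) =====
-- def alright(p):
--     r = 0
--     l = 0
--     for i in range(len(p)):
--         if p[0] == ')':
--             return False
--         if p[i] == '(':
--             l += 1
--         else:
--             r += 1
--         if r > l:
--             return False
--     return True
-- ===== SOURCE B (Python) =====
-- def alright(p):
--     # Build the running-balance prefix sums (+1 for '(', -1 otherwise)
--     # and check that the minimum prefix balance is non-negative.
--     bal = []
--     s = 0
--     for c in p:
--         s += 1 if c == '(' else -1
--         bal.append(s)
--     return min(bal, default=0) >= 0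
-- ===== Notes on version B (the rewrite author's own statement) =====
-- stated objective: simpler
-- what changed: Replaced the twin open/close counters with early returns (and the per-iteration p[0] recheck) by a prefix-balance table whose minimum is compared to zero once.
import Mathlib
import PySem

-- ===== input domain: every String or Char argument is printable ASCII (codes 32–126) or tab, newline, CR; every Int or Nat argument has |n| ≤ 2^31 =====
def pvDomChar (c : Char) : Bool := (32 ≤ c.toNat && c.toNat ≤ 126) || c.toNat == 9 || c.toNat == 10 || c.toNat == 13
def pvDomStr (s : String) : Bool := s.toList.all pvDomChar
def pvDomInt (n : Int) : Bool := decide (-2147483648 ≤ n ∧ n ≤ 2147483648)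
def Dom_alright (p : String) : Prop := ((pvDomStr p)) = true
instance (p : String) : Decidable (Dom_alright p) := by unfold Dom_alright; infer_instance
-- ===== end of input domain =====

-- B replaces A's twin counters and early returns by a prefix-balance table whose minimum is checked once; return values agree everywhere.
-- ===== PORT A =====
-- loop of A: state (r, l); the 'p[0] == \')\'' check re-reads the fixed first character c0 every iteration
def alrightGo (c0 : Char) (r l : Int) : List Char → Bool
  | [] => true
  | c :: rest =>
    if c0 = ')' then false
    else
      let (r', l') := if c = '(' then (r, l + 1) else (r + 1, l)
      if r' > l' then false else alrightGo c0 r' l' rest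

def alright (p : String) : Bool :=
  match p.toList with
  | [] => true
  | c0 :: _ => alrightGo c0 0 0 p.toList

-- ===== PORT B =====
-- Source B: build the list of running balances, then compare min(bal, default=0) with 0
def alright_alt (p : String) : Bool :=
  let acc := p.toList.foldl
    (fun (acc : List Int × Int) c =>
      let s := acc.2 + (if c = '(' then 1 else -1)
      (acc.1 ++ [s], s)) ([], 0)
  decide (0 ≤ (PySem.List.min? acc.1 (fun x => x)).getD 0)

-- ===== PRECONDITION & SPEC =====
def Spec_alright (p : String) (out : Bool) : Prop := out = alright_alt p
instance (p : String) (out : Bool) : Decidable (Spec_alright p out) := by unfold Spec_alright; infer_instance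

-- ===== CLAIM (what is proved, stated in full; the proofs are below) =====
def Claim_equal_alright : Prop := ∀ (p : String), Dom_alright p → Spec_alright p (alright p)

-- ===== LEMMAS AND PROOFS =====

-- prefix-balance list starting from s (proof-side characterisation)
def pref (s : Int) : List Char → List Int
  | [] => []
  | c :: t => (s + (if c = '(' then 1 else -1)) :: pref (s + (if c = '(' then 1 else -1)) t

theorem foldl_pref_fst (cs : List Char) : ∀ (as : List Int) (s : Int),
    (cs.foldl (fun (acc : List Int × Int) c =>
      let s := acc.2 + (if c = '(' then 1 else -1)
      (acc.1 ++ [s], s)) (as, s)).1 = as ++ pref s cs := by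
  induction cs with
  | nil => intro as s; simp [pref]
  | cons c t ih => intro as s; simp [List.foldl, pref, ih]

theorem go_eq_allNN (cs : List Char) (c0 : Char) (h : ¬ c0 = ')') :
    ∀ (r l : Int), alrightGo c0 r l cs = decide (∀ x ∈ pref (l - r) cs, 0 ≤ x) := by
  induction cs with
  | nil => intro r l; simp [alrightGo, pref]
  | cons c t ih =>
    intro r l
    simp only [alrightGo, if_neg h, pref]
    by_cases hc : c = '('
    · simp only [if_pos hc]
      by_cases hrl : r > l + 1
      · simp only [if_pos hrl]
        have : ¬ (0 ≤ l - r + 1) := by omega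
        simp [this]
      · simp only [if_neg hrl, ih]
        have h2 : 0 ≤ l - r + 1 := by omega
        have h3 : l + 1 - r = l - r + 1 := by omega
        simp [h2, h3]
    · simp only [if_neg hc]
      by_cases hrl : r + 1 > l
      · simp only [if_pos hrl]
        have : ¬ (0 ≤ l - r + -1) := by omega
        simp [this]
      · simp only [if_neg hrl, ih]
        have h2 : 0 ≤ l - r + -1 := by omega
        have h3 : l - (r + 1) = l - r + -1 := by omega
        simp [h2, h3]

theorem min_getD_nonneg (xs : List Int) :
    decide (0 ≤ (PySem.List.min? xs (fun x => x)).getD 0) = decide (∀ x ∈ xs, 0 ≤ x) := by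
  cases hx : PySem.List.min? xs (fun x => x) with
  | none =>
    have := PySem.List.min?_eq_none_iff (xs := xs) (key := fun x => x)
    simp [hx] at this
    simp [this]
  | some m =>
    have hmem : m ∈ xs := PySem.List.min?_mem hx
    have hmin : ∀ y ∈ xs, m ≤ y := by
      intro y hy
      exact PySem.List.min?_isMin hx y hy
    simp only [Option.getD_some]
    by_cases h0 : 0 ≤ m
    · have hall : ∀ x ∈ xs, 0 ≤ x := fun x hxm => le_trans h0 (hmin x hxm)
      simpa [h0] using hall
    · have : ¬ (∀ x ∈ xs, 0 ≤ x) := fun h => h0 (h m hmem)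
      simp [h0, this]

-- ===== VERDICT (by name: the statement is the Claim_ definition above) =====
theorem alright_spec : Claim_equal_alright := by
  intro p _
  unfold Spec_alright alright alright_alt
  simp only [foldl_pref_fst, min_getD_nonneg, List.nil_append]
  cases hcs : p.toList with
  | nil => simp [pref]
  | cons c0 t =>
    by_cases h0 : c0 = ')'
    · subst h0
      simp only [alrightGo, pref]
      have hch : ¬ (')' = '(') := by decide
      simp [hch]
    · show alrightGo c0 0 0 (c0 :: t) = decide (∀ x ∈ pref 0 (c0 :: t), 0 ≤ x)
      rw [go_eq_allNN _ _ h0]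
      norm_num
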